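-- pv_equiv track=rewrite | github.com/kaijchang/Semantic-Change-Law | main.py | isplit
-- ===== SOURCE A (Python) =====
-- def isplit(s: str, sep: str):
--     """Lazy version of s.split(sep)
--
--     >>> list(isplit("", ","))
--     ['']
--     >>> list(isplit("AAA", ","))
--     ['AAA']
--     >>> list(isplit("AAA,", ","))
--     ['AAA', '']
--     >>> list(isplit("AAA,BBB", ","))
--     ['AAA', 'BBB']
--     >>> list(isplit("AAA,,BBB", ",,"))
--     ['AAA', 'BBB']
--     """
--     seplen = len(sep)
--     if seplen == 0:
--         raise ValueError("empty separator")
--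
--     start = 0
--     while True:
--         index = s.find(sep, start)
--         if index == -1:
--             yield s[start:]
--             return
--         yield s[start:index]
--         start = index + seplen
-- ===== SOURCE B (Python) =====
-- def isplit(s: str, sep: str):
--     """Lazy split: char-by-char scan with an accumulator buffer."""
--     seplen = len(sep)
--     if seplen == 0:
--         raise ValueError("empty separator")
--     buf = []
--     i = 0
--     while i < len(s):
--         if s[i:i + seplen] == sep:
--             yield ''.join(buf)
--             buf = []
--             i += seplen
--         else:
--             buf.append(s[i])
--             i += 1
--     yield ''.join(buf)
-- ===== Notes on version B (the rewrite author's own statement) =====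
-- stated objective: alternative
-- what changed: Replaces the repeated s.find(sep, start) + slicing jumps with a single character-by-character scan that maintains a token accumulator buffer and tests s[i:i+seplen] == sep at each position.
import Mathlib
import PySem

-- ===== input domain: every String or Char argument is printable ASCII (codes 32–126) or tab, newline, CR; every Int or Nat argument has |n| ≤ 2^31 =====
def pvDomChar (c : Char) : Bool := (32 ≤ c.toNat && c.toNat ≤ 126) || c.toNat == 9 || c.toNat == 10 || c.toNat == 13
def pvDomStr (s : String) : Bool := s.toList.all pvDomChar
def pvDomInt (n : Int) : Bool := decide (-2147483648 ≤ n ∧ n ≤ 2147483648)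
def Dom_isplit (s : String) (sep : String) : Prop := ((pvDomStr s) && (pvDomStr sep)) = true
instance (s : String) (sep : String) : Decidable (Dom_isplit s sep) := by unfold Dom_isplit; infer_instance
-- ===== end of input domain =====

-- B changes the decomposition: instead of jumping between s.find results and slicing,
-- it scans character by character maintaining an accumulator buffer (objective: alternative).
-- Both versions are generators in Python; the ports return the list of all yielded pieces.

-- ===== PORT A =====
-- bounds of s.find(sep, start) when it succeeds (used by the port for termination)
theorem pvFindFromBounds (s sep : List Char) (hsep : sep ≠ []) (start : Nat)
    (hstart : start ≤ s.length)
    (h : PySem.Chars.findFrom s sep (start : Int) none ≠ -1) :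
    start ≤ (PySem.Chars.findFrom s sep (start : Int) none).toNat ∧
      (PySem.Chars.findFrom s sep (start : Int) none).toNat + sep.length ≤ s.length := by
  obtain ⟨h1, h2, _⟩ := PySem.Chars.findFrom_natCast_spec s sep start hstart h
  have hlen := h2.length_le
  simp only [List.length_drop] at hlen
  constructor
  · omega
  · have : sep.length ≥ 1 := by
      cases sep with
      | nil => exact absurd rfl hsep
      | cons a t => simp
    omega

-- the while-True loop of A: repeated find + slice from `start`
def isplitGoA (s sep : List Char) (hsep : sep ≠ []) (start : Nat) (hstart : start ≤ s.length) :
    List (List Char) :=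
  let index := PySem.Chars.findFrom s sep (start : Int) none
  if h : index = -1 then
    [PySem.List.slice s (some (start : Int)) none]
  else
    PySem.List.slice s (some (start : Int)) (some index) ::
      isplitGoA s sep hsep (index.toNat + sep.length)
        (pvFindFromBounds s sep hsep start hstart h).2
termination_by s.length - start
decreasing_by
  have hb := pvFindFromBounds s sep hsep start hstart h
  have : sep.length ≥ 1 := by
    cases sep with
    | nil => exact absurd rfl hsep
    | cons a t => simp
  omega

def isplit (s : String) (sep : String) : List String :=
  if h : sep.toList = [] then []  -- Python raises ValueError("empty separator"); outside Pre_
  else (isplitGoA s.toList sep.toList h 0 (Nat.zero_le _)).map String.ofList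

-- ===== PORT B =====
-- the while i < len(s) loop of B: char-by-char scan with accumulator `buf`
def isplitGoB (s sep : List Char) (hsep : sep ≠ []) (i : Nat) (buf : List Char) :
    List (List Char) :=
  if h : i < s.length then
    if PySem.List.slice s (some (i : Int)) (some ((i : Int) + (sep.length : Int))) = sep then
      buf :: isplitGoB s sep hsep (i + sep.length) []
    else
      isplitGoB s sep hsep (i + 1) (buf ++ [s[i]])
  else
    [buf]
termination_by s.length - i
decreasing_by
  · have : sep.length ≥ 1 := by
      cases sep with
      | nil => exact absurd rfl hsep
      | cons a t => simp
    omega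
  · omega

def isplit_alt (s : String) (sep : String) : List String :=
  if h : sep.toList = [] then []  -- ValueError("empty separator"); outside Pre_
  else (isplitGoB s.toList sep.toList h 0 []).map String.ofList

-- ===== PRECONDITION & SPEC =====
-- Pre_ excludes exactly the empty separator, on which Python A (and B) raise ValueError.
def Pre_isplit (s : String) (sep : String) : Prop := sep ≠ ""
instance (s : String) (sep : String) : Decidable (Pre_isplit s sep) := by
  unfold Pre_isplit; infer_instance

def pvWitness_isplit : String × String := ("AAA,BBB", ",")

def Spec_isplit (s : String) (sep : String) (out : List String) : Prop := out = isplit_alt s sep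
instance (s : String) (sep : String) (out : List String) : Decidable (Spec_isplit s sep out) := by
  unfold Spec_isplit; infer_instance

-- ===== CLAIM (what is proved, stated in full; the proofs are below) =====
def Claim_equal_isplit : Prop :=
  ∀ (s : String) (sep : String), Dom_isplit s sep → Pre_isplit s sep →
    Spec_isplit s sep (isplit s sep)

-- ===== LEMMAS AND PROOFS =====

theorem pv_seplen_pos (sep : List Char) (hsep : sep ≠ []) : 1 ≤ sep.length := by
  cases sep with
  | nil => exact absurd rfl hsep
  | cons a t => simp

-- a prefix match strictly inside the list cannot start at i when take misses
theorem pv_not_prefix_of_slice_ne (s sep : List Char) (i : Nat)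
    (h : List.take sep.length (List.drop i s) ≠ sep) : ¬ sep <+: List.drop i s := by
  intro hp
  exact h (List.prefix_iff_eq_take.mp hp).symm

-- infix of drop i without a match at i is infix of drop (i+1)
theorem pv_infix_shift (s sep : List Char) (i : Nat)
    (hnp : ¬ sep <+: List.drop i s) :
    (sep <:+: List.drop i s) ↔ (sep <:+: List.drop (i + 1) s) := by
  constructor
  · intro hinf
    obtain ⟨pre, suf, hps⟩ := hinf
    cases pre with
    | nil =>
      exact absurd ⟨suf, by simpa using hps⟩ hnp
    | cons a t =>
      refine ⟨t, suf, ?_⟩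
      have hd : List.drop (i + 1) s = List.drop 1 (List.drop i s) := by
        rw [List.drop_drop]
      rw [hd, ← hps]
      simp
  · intro hinf
    have hsub : List.drop (i + 1) s <:+: List.drop i s := by
      have hd : List.drop (i + 1) s = List.drop 1 (List.drop i s) := by
        rw [List.drop_drop]
      rw [hd]
      exact (List.drop_suffix 1 _).isInfix
    exact hinf.trans hsub

-- findFrom is unchanged by stepping over a non-match position
theorem pv_findFrom_step (s sep : List Char) (i : Nat) (hi : i < s.length)
    (hnp : ¬ sep <+: List.drop i s) :
    PySem.Chars.findFrom s sep ((i : Nat) : Int) none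
      = PySem.Chars.findFrom s sep ((i + 1 : Nat) : Int) none := by
  have hi1 : i + 1 ≤ s.length := hi
  have hii : i ≤ s.length := Nat.le_of_lt hi
  by_cases h1 : PySem.Chars.findFrom s sep ((i : Nat) : Int) none = -1
  · have h2 : PySem.Chars.findFrom s sep ((i + 1 : Nat) : Int) none = -1 := by
      rw [PySem.Chars.findFrom_natCast_eq_neg_one_iff s sep (i+1) hi1]
      rw [PySem.Chars.findFrom_natCast_eq_neg_one_iff s sep i hii] at h1
      intro hinf
      exact h1 ((pv_infix_shift s sep i hnp).mpr hinf)
    rw [h1, h2]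
  · have h2 : PySem.Chars.findFrom s sep ((i + 1 : Nat) : Int) none ≠ -1 := by
      intro hx
      rw [PySem.Chars.findFrom_natCast_eq_neg_one_iff s sep (i+1) hi1] at hx
      apply h1
      rw [PySem.Chars.findFrom_natCast_eq_neg_one_iff s sep i hii]
      intro hinf
      exact hx ((pv_infix_shift s sep i hnp).mp hinf)
    obtain ⟨ha1, ha2, ha3⟩ := PySem.Chars.findFrom_natCast_spec s sep i hii h1
    obtain ⟨hb1, hb2, hb3⟩ := PySem.Chars.findFrom_natCast_spec s sep (i+1) hi1 h2
    set f1 := PySem.Chars.findFrom s sep ((i : Nat) : Int) none with hf1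
    set f2 := PySem.Chars.findFrom s sep ((i + 1 : Nat) : Int) none with hf2
    have hf1n : f1.toNat ≠ i := by
      intro he; rw [he] at ha2; exact hnp ha2
    have hf1ge : i + 1 ≤ f1.toNat := by omega
    have hle1 : f2.toNat ≤ f1.toNat := by
      by_contra hc
      exact hb3 f1.toNat hf1ge (by omega) ha2
    have hle2 : f1.toNat ≤ f2.toNat := by
      by_contra hc
      exact ha3 f2.toNat (by omega) (by omega) hb2
    omega

-- match at i ⇒ findFrom returns exactly i
theorem pv_findFrom_at_match (s sep : List Char) (i : Nat) (hi : i ≤ s.length)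
    (hp : sep <+: List.drop i s) :
    PySem.Chars.findFrom s sep ((i : Nat) : Int) none = (i : Int) := by
  have hne : PySem.Chars.findFrom s sep ((i : Nat) : Int) none ≠ -1 := by
    rw [Ne, PySem.Chars.findFrom_natCast_eq_neg_one_iff s sep i hi]
    intro h; exact h hp.isInfix
  obtain ⟨h1, h2, h3⟩ := PySem.Chars.findFrom_natCast_spec s sep i hi hne
  have : (PySem.Chars.findFrom s sep ((i : Nat) : Int) none).toNat = i := by
    by_contra hc
    exact h3 i (le_refl _) (by omega) hp
  omega

-- slice s[i:f] = s[i] :: s[i+1:f] when i < f ≤ len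
theorem pv_slice_cons (s : List Char) (i f : Nat) (hif : i < f) (hf : i < s.length) :
    PySem.List.slice s (some ((i : Nat) : Int)) (some ((f : Nat) : Int))
      = s[i] :: PySem.List.slice s (some ((i + 1 : Nat) : Int)) (some ((f : Nat) : Int)) := by
  rw [PySem.List.slice_natCast, PySem.List.slice_natCast]
  rw [show f - i = (f - (i + 1)) + 1 by omega]
  rw [List.drop_eq_getElem_cons hf, List.take_succ_cons]

theorem pv_modifyHead_nil (l : List (List Char)) :
    l.modifyHead (fun c => ([] : List Char) ++ c) = l := by
  cases l <;> simp [List.modifyHead]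

-- the B loop equals the A loop with the pending buffer prepended to the first chunk
theorem pv_goB_eq_goA (s sep : List Char) (hsep : sep ≠ []) :
    ∀ (n i : Nat) (buf : List Char) (hi : i ≤ s.length), s.length - i ≤ n →
      isplitGoB s sep hsep i buf
        = (isplitGoA s sep hsep i hi).modifyHead (fun c => buf ++ c) := by
  intro n
  induction n with
  | zero =>
    intro i buf hi hn
    have hie : i = s.length := by omega
    subst hie
    rw [isplitGoB, isplitGoA]
    have hnf : PySem.Chars.findFrom s sep ((s.length : Nat) : Int) none = -1 := by
      rw [PySem.Chars.findFrom_natCast_eq_neg_one_iff s sep s.length (le_refl _)]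
      rw [List.drop_length, List.infix_nil]
      exact hsep
    simp [hnf, PySem.List.slice_from_natCast, List.modifyHead]
  | succ n ih =>
    intro i buf hi hn
    rw [isplitGoB]
    by_cases hlt : i < s.length
    · simp only [hlt, dif_pos]
      by_cases hm : PySem.List.slice s (some (i : Int)) (some ((i : Int) + (sep.length : Int))) = sep
      · simp only [hm, if_pos]
        -- match at i : findFrom = i, first chunk of A is empty
        have hm' : List.take sep.length (List.drop i s) = sep := by
          rw [← PySem.List.slice_natCast_add]; exact_mod_cast hm
        have hp : sep <+: List.drop i s := by
          rw [← hm']; exact List.take_prefix _ _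
        have hlen : i + sep.length ≤ s.length := by
          have := hp.length_le
          simp only [List.length_drop] at this
          omega
        have hff := pv_findFrom_at_match s sep i hi hp
        rw [isplitGoA]
        have hne : ¬ ((i : Int) = -1) := by omega
        simp only [hff, hne, dif_neg, not_false_iff]
        have hsl : PySem.List.slice s (some (i : Int)) (some (i : Int)) = [] := by
          rw [PySem.List.slice_natCast]; simp
        rw [ih (i + sep.length) [] hlen (by have := pv_seplen_pos sep hsep; omega)]
        rw [hsl, pv_modifyHead_nil]
        simp only [List.modifyHead, List.append_nil]
        rfl
      · simp only [hm, if_neg, not_false_iff]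
        -- no match at i : findFrom unchanged, step the scan
        have hm' : List.take sep.length (List.drop i s) ≠ sep := by
          intro hx; apply hm
          rw [← PySem.List.slice_natCast_add] at hx; exact_mod_cast hx
        have hnp := pv_not_prefix_of_slice_ne s sep i hm'
        have hstep := pv_findFrom_step s sep i hlt hnp
        have hi1 : i + 1 ≤ s.length := hlt
        rw [ih (i + 1) (buf ++ [s[i]]) hi1 (by omega)]
        rw [isplitGoA, isplitGoA]
        by_cases hneg : PySem.Chars.findFrom s sep ((i : Nat) : Int) none = -1
        · have hneg1 : PySem.Chars.findFrom s sep ((i + 1 : Nat) : Int) none = -1 := by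
            rw [← hstep]; exact hneg
          simp only [hneg, hneg1, dif_pos]
          simp only [PySem.List.slice_from_natCast, List.modifyHead]
          rw [List.drop_eq_getElem_cons hlt]
          simp
        · have hneg1 : PySem.Chars.findFrom s sep ((i + 1 : Nat) : Int) none ≠ -1 := by
            rw [← hstep]; exact hneg
          simp only [hneg, hneg1, dif_neg, not_false_iff]
          obtain ⟨ha1, ha2, ha3⟩ := PySem.Chars.findFrom_natCast_spec s sep i hi hneg
          set f := PySem.Chars.findFrom s sep ((i : Nat) : Int) none with hf
          have hfn : f.toNat ≠ i := by
            intro he; rw [he] at ha2; exact hnp ha2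
          have hfi : i + 1 ≤ f.toNat := by omega
          have hfeq : f = ((f.toNat : Nat) : Int) := by omega
          have hsc := pv_slice_cons s i f.toNat hfi hlt
          rw [← hfeq] at hsc
          simp only [List.modifyHead, ← hstep]
          rw [hsc]
          simp only [List.cons_append, List.append_assoc, List.cons.injEq]
          exact ⟨rfl, rfl⟩
    · -- i = s.length : loop ends, A finds nothing
      have hie : i = s.length := by omega
      subst hie
      simp only [hlt, dif_neg, not_false_iff]
      rw [isplitGoA]
      have hnf : PySem.Chars.findFrom s sep ((s.length : Nat) : Int) none = -1 := by
        rw [PySem.Chars.findFrom_natCast_eq_neg_one_iff s sep s.length (le_refl _)]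
        rw [List.drop_length, List.infix_nil]
        exact hsep
      simp [hnf, PySem.List.slice_from_natCast, List.modifyHead]

-- ===== VERDICT (by name: the statement is the Claim_ definition above) =====
theorem isplit_spec : Claim_equal_isplit := by
  intro s sep _ hpre
  unfold Spec_isplit isplit isplit_alt
  have hsep : sep.toList ≠ [] := by
    intro h
    exact hpre (String.toList_eq_nil_iff.mp h)
  simp only [hsep, dif_neg, not_false_iff]
  rw [pv_goB_eq_goA s.toList sep.toList hsep s.toList.length 0 [] (Nat.zero_le _) (by omega)]
  rw [pv_modifyHead_nil]
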